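-- pv_equiv track=rewrite | github.com/put-tzok/sorting-zi-4a-wild-hunt | sort_problems.py | ns
-- ===== SOURCE A (Python) =====
-- def ns(ins):
--     nss = []
--     base = 5
--     key = 2
--     for i in range(0, ins):
--         if i == 0:
--             nss.append(base)
--             base *= key
--         else:
--             nss.append(base)
--             base *= key
--     return nss
-- ===== SOURCE B (Python) =====
-- def ns(ins):
--     if ins <= 0:
--         return []
--     if ins == 1:
--         return [5]
--     k = ins // 2
--     left = ns(k)
--     right = ns(ins - k)
--     return left + [2**k * x for x in right]
-- ===== Notes on version B (the rewrite author's own statement) =====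
-- stated objective: alternative
-- what changed: B replaces A's single loop with a carried base/key accumulator by a divide-and-conquer recursion: the list for n is the list for the floor-half of n concatenated with the list for the remaining half scaled element-wise by the power of two at the split point, with no loop index or running state.
import Mathlib
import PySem

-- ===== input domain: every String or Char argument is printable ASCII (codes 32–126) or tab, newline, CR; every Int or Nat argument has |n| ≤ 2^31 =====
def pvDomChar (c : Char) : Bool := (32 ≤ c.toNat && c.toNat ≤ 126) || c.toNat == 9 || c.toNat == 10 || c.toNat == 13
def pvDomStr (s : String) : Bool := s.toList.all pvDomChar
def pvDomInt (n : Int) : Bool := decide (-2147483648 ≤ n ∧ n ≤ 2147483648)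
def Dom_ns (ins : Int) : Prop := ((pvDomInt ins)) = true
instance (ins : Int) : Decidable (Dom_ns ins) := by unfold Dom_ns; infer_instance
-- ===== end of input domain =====

-- B: divide and conquer — the list for n is the list for n//2 followed by the list for the remaining half scaled by 2^(n//2); no loop or carried accumulator (alternative algorithm).

-- ===== PORT A =====
def ns (ins : Int) : List Int :=
  -- nss = []; base = 5; key = 2; for i in range(0, ins): if i == 0 … else … ; return nss
  (((PySem.List.pyRange 0 ins 1).foldl
    (fun (st : List Int × Int) i =>
      if i == 0 then (st.1 ++ [st.2], st.2 * 2)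
      else (st.1 ++ [st.2], st.2 * 2))
    ([], 5)).1)

-- ===== PORT B =====
def ns_alt (ins : Int) : List Int :=
  if ins ≤ 0 then []
  else if ins = 1 then [5]
  else
    let k := PySem.Int.floordiv ins 2
    ns_alt k ++ (ns_alt (ins - k)).map (fun x => 2 ^ k.toNat * x)
termination_by ins.toNat
decreasing_by
  all_goals
    rename_i h0 h1
    rw [PySem.Int.floordiv_eq_ediv_of_pos (by omega)]
    omega

-- ===== PRECONDITION & SPEC =====
def Spec_ns (ins : Int) (out : List Int) : Prop := out = ns_alt ins
instance (ins : Int) (out : List Int) : Decidable (Spec_ns ins out) := by unfold Spec_ns; infer_instance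

-- ===== CLAIM (what is proved, stated in full; the proofs are below) =====
def Claim_equal_ns : Prop := ∀ (ins : Int), Dom_ns ins → Spec_ns ins (ns ins)

-- ===== LEMMAS AND PROOFS =====

-- A's loop invariant: after n iterations the list is the first n powers and base = 5*2^n.
lemma ns_fold (n : Nat) :
    (PySem.List.pyRange 0 (n : Int) 1).foldl
      (fun (st : List Int × Int) i =>
        if i == 0 then (st.1 ++ [st.2], st.2 * 2)
        else (st.1 ++ [st.2], st.2 * 2))
      ([], 5)
    = ((List.range n).map (fun i => 5 * 2 ^ i), 5 * 2 ^ n) := by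
  induction n with
  | zero => simp
  | succ m ih =>
      have h : ((m : Int) + 1) = ((m + 1 : Nat) : Int) := by push_cast; ring
      rw [← h, PySem.List.pyRange_one_succ_right (by positivity)]
      simp only [List.foldl_append, ih, List.foldl_cons, List.foldl_nil, List.range_succ,
        List.map_append, List.map_cons, List.map_nil]
      split <;> · rw [Prod.mk.injEq]; exact ⟨rfl, by ring⟩

-- B's closed form, by strong induction on n.
lemma ns_alt_closed (n : Nat) : ns_alt (n : Int) = (List.range n).map (fun i => 5 * 2 ^ i) := by
  induction n using Nat.strong_induction_on with
  | _ n ih =>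
    match n with
    | 0 => simp [ns_alt]
    | 1 => rw [ns_alt]; norm_num
    | (m + 2) =>
      rw [ns_alt]
      have h0 : ¬ ((m + 2 : Nat) : Int) ≤ 0 := by push_cast; omega
      have h1 : ((m + 2 : Nat) : Int) ≠ 1 := by push_cast; omega
      rw [if_neg h0, if_neg h1]
      have hk : PySem.Int.floordiv ((m + 2 : Nat) : Int) 2 = (((m + 2) / 2 : Nat) : Int) := by
        exact_mod_cast PySem.Int.floordiv_natCast (m + 2) 2
      set h := (m + 2) / 2 with hh
      have hlt1 : h < m + 2 := by omega
      have hlt2 : m + 2 - h < m + 2 := by omega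
      have hd : ((m + 2 : Nat) : Int) - (h : Int) = ((m + 2 - h : Nat) : Int) := by
        push_cast [Nat.cast_sub (by omega : h ≤ m + 2)]; ring
      simp only [hk, hd, ih h hlt1, ih (m + 2 - h) hlt2]
      have ht : (((h : Nat) : Int)).toNat = h := by simp
      rw [ht]
      conv_rhs => rw [show m + 2 = h + (m + 2 - h) from by omega, List.range_add]
      rw [List.map_append, List.map_map, List.map_map]
      congr 1
      refine List.map_congr_left (fun i _ => ?_)
      simp [Function.comp, pow_add]
      ring

-- ===== VERDICT (by name: the statement is the Claim_ definition above) =====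
theorem ns_spec : Claim_equal_ns := by
  intro ins _
  unfold Spec_ns ns
  by_cases h : ins ≤ 0
  · rw [PySem.List.pyRange_one_eq_nil h, ns_alt, if_pos h]; rfl
  · have he : ins = (ins.toNat : Int) := (Int.toNat_of_nonneg (by omega)).symm
    rw [he, ns_fold, ns_alt_closed]
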